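-- pv_equiv track=rewrite | github.com/JonathanJihwanKim/pbip_model_lenz | src/model_lenz/parsers/tmdl.py | _expand_indent
-- ===== SOURCE A (Python) =====
-- def _expand_indent(line: str) -> tuple[int, str]:
--     """Return (indent units, content). One unit = one tab or four spaces."""
--     n_tabs = 0
--     n_spaces = 0
--     for ch in line:
--         if ch == "\t":
--             n_tabs += 1
--         elif ch == " ":
--             n_spaces += 1
--         else:
--             break
--     indent = n_tabs + (n_spaces // 4)
--     return indent, line[n_tabs + n_spaces :]
-- ===== SOURCE B (Python) =====
-- def _expand_indent(line: str) -> tuple[int, str]: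
--     """Return (indent units, content). One unit = one tab or four spaces."""
--     content = line.lstrip(" \t")
--     prefix = line[: len(line) - len(content)]
--     return prefix.count("\t") + prefix.count(" ") // 4, content
-- ===== Notes on version B (the rewrite author's own statement) =====
-- stated objective: idiomatic
-- what changed: Replaces the explicit per-character counting loop with a library decomposition: an lstrip of spaces and tabs yields the content, the stripped-off prefix is sliced off, and str.count supplies the tab and space tallies.
import Mathlib
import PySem

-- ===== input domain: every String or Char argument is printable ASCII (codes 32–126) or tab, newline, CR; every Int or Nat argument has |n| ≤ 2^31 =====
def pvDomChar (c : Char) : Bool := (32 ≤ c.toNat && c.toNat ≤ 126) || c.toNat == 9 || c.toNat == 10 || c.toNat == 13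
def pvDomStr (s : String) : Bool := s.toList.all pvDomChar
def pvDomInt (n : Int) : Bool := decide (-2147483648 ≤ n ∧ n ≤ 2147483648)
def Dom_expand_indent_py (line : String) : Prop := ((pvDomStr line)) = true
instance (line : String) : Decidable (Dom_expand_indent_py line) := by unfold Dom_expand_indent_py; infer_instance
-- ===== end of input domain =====

-- B recomputes the same (indent, content) pair via lstrip/slice/count instead of A's explicit counting loop; proved equal on all inputs.

-- ===== PORT A =====
-- the for-loop with break: accumulates (n_tabs, n_spaces) until a non-tab/space char
def pvLoopA : List Char → Int × Int → Int × Int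
  | [], acc => acc
  | c :: rest, (t, s) =>
    if c == '\t' then pvLoopA rest (t + 1, s)
    else if c == ' ' then pvLoopA rest (t, s + 1)
    else (t, s)

def expand_indent_py (line : String) : Int × String :=
  let (n_tabs, n_spaces) := pvLoopA line.toList (0, 0)
  (n_tabs + PySem.Int.floordiv n_spaces 4,
   String.ofList (PySem.Chars.slice line.toList (some (n_tabs + n_spaces)) none))

-- ===== PORT B =====
def expand_indent_py_alt (line : String) : Int × String :=
  -- content = line.lstrip(" \t")  (hand port, exact: drops only ' ' and '\t' from the left)
  let content : List Char := line.toList.dropWhile (fun c => c == ' ' || c == '\t')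
  -- prefix = line[: len(line) - len(content)]
  let pre : List Char := PySem.Chars.slice line.toList none (some ((line.toList.length : Int) - (content.length : Int)))
  -- prefix.count("\t") + prefix.count(" ") // 4
  ((PySem.Chars.count pre ['\t'] : Int) + PySem.Int.floordiv (PySem.Chars.count pre [' '] : Int) 4,
   String.ofList content)

-- ===== PRECONDITION & SPEC =====
def Spec_expand_indent_py (line : String) (out : Int × String) : Prop := out = expand_indent_py_alt line
instance (line : String) (out : Int × String) : Decidable (Spec_expand_indent_py line out) := by unfold Spec_expand_indent_py; infer_instance

-- ===== CLAIM (what is proved, stated in full; the proofs are below) =====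
def Claim_equal_expand_indent_py : Prop := ∀ (line : String), Dom_expand_indent_py line → Spec_expand_indent_py line (expand_indent_py line)

-- ===== LEMMAS AND PROOFS =====

-- single-character substring count is element count
theorem go_single (c : Char) (l : List Char) : ∀ (fuel : Nat) (acc : Nat), l.length ≤ fuel →
    PySem.Chars.count.go [c] fuel l acc = acc + l.count c := by
  induction l with
  | nil => intro fuel acc _; cases fuel <;> simp [PySem.Chars.count.go]
  | cons x xs ih =>
    intro fuel acc h
    cases fuel with
    | zero => simp at h
    | succ n =>
      simp only [PySem.Chars.count.go]
      by_cases hx : x = c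
      · subst hx
        simp [List.isPrefixOf, ih n (acc + 1) (by simpa using h)]
        omega
      · have hcx : ¬ c = x := fun h' => hx h'.symm
        simp [List.isPrefixOf, hx, hcx, ih n acc (by simpa using h)]

theorem chars_count_single (c : Char) (l : List Char) :
    PySem.Chars.count l [c] = l.count c := by
  simp [PySem.Chars.count, go_single c l l.length 0 (le_refl _)]

-- A's loop computes the tab/space counts of the maximal tab/space prefix
theorem pvLoopA_eq (cs : List Char) (t s : Int) :
    pvLoopA cs (t, s) =
      (t + ((cs.takeWhile (fun c => c == ' ' || c == '\t')).count '\t' : Int),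
       s + ((cs.takeWhile (fun c => c == ' ' || c == '\t')).count ' ' : Int)) := by
  induction cs generalizing t s with
  | nil => simp [pvLoopA]
  | cons x xs ih =>
    simp only [pvLoopA]
    by_cases hx : x = '\t'
    · subst hx
      simp [ih]
      ring
    · by_cases hx' : x = ' '
      · subst hx'
        simp [ih]
        ring
      · simp [hx, hx']

theorem count_add_count_takeWhile (cs : List Char) :
    (cs.takeWhile (fun c => c == ' ' || c == '\t')).count '\t'
      + (cs.takeWhile (fun c => c == ' ' || c == '\t')).count ' '
      = (cs.takeWhile (fun c => c == ' ' || c == '\t')).length := by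
  induction cs with
  | nil => simp
  | cons x xs ih =>
    by_cases hx : x = '\t'
    · subst hx; simp [ih]; omega
    · by_cases hx' : x = ' '
      · subst hx'; simp [ih]; omega
      · simp [hx, hx']

-- ===== VERDICT (by name: the statement is the Claim_ definition above) =====
theorem expand_indent_py_spec : Claim_equal_expand_indent_py := by
  intro line _
  unfold Spec_expand_indent_py expand_indent_py expand_indent_py_alt
  set cs := line.toList with hcs
  set tw := cs.takeWhile (fun c => c == ' ' || c == '\t') with htw
  set dw := cs.dropWhile (fun c => c == ' ' || c == '\t') with hdw
  have hsplit : cs = tw ++ dw := (List.takeWhile_append_dropWhile).symm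
  have hdrop : cs.drop tw.length = dw := by
    conv_lhs => rw [hsplit]
    exact List.drop_left
  have htake : cs.take tw.length = tw := by
    conv_lhs => rw [hsplit]
    exact List.take_left
  have hlen : cs.length = tw.length + dw.length := by
    conv_lhs => rw [hsplit]
    exact List.length_append
  have hcount := count_add_count_takeWhile cs
  rw [pvLoopA_eq]
  simp only [zero_add]
  have hidx : ((tw.count '\t' : Int) + (tw.count ' ' : Int)) = ((tw.length : Nat) : Int) := by
    exact_mod_cast hcount
  have hidx2 : ((cs.length : Int) - (dw.length : Int)) = ((tw.length : Nat) : Int) := by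
    omega
  rw [hidx, hidx2, PySem.Chars.slice_eq_listSlice, PySem.Chars.slice_eq_listSlice,
      PySem.List.slice_from_natCast, PySem.List.slice_to_natCast,
      hdrop, htake, chars_count_single, chars_count_single]
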